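-- pv_equiv track=rewrite | github.com/shelldandy/homelab | home-assistant/scripts/energy_analysis.py | select_entity
-- ===== SOURCE A (Python) =====
-- def select_entity(entities, category, override=None):
--     """Select the best entity for a category, or use override."""
--     if override:
--         for e in entities:
--             if e["entity_id"] == override:
--                 return e
--         # If override not found in discovered list, construct a basic info dict
--         return {"entity_id": override, "unit": "kWh", "state_class": "total_increasing"}
--
--     if not entities:
--         return None
--
--     # Prefer entities with state_class total_increasing and kWh unit
--     scored = []
--     for e in entities:
--         score = 0
--         if e.get("state_class") in ("total_increasing", "total"):
--             score += 10
--         if e.get("unit") in ("kWh", "Wh"):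
--             score += 5
--         if e.get("device_class") == "energy":
--             score += 3
--         scored.append((score, e))
--
--     scored.sort(key=lambda x: x[0], reverse=True)
--     return scored[0][1]
-- ===== SOURCE B (Python) =====
-- def _score(e):
--     return ((10 if e.get("state_class") in ("total_increasing", "total") else 0)
--             + (5 if e.get("unit") in ("kWh", "Wh") else 0)
--             + (3 if e.get("device_class") == "energy" else 0))
--
--
-- def select_entity(entities, category, override=None):
--     """Select the best entity for a category, or use override."""
--     if override:
--         return next((e for e in entities if e.get("entity_id") == override),
--                     {"entity_id": override, "unit": "kWh", "state_class": "total_increasing"})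
--     if not entities:
--         return None
--     return max(entities, key=_score)
-- ===== Notes on version B (the rewrite author's own statement) =====
-- stated objective: simpler
-- what changed: Replaces the build-(score,entity)-pairs / stable-reverse-sort / take-first selection by a single-pass max(entities, key=score) with a small scoring helper, and the override loop by next() over a generator using e.get, which also returns the fallback dict instead of raising KeyError on entities without an 'entity_id' key.
import Mathlib
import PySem

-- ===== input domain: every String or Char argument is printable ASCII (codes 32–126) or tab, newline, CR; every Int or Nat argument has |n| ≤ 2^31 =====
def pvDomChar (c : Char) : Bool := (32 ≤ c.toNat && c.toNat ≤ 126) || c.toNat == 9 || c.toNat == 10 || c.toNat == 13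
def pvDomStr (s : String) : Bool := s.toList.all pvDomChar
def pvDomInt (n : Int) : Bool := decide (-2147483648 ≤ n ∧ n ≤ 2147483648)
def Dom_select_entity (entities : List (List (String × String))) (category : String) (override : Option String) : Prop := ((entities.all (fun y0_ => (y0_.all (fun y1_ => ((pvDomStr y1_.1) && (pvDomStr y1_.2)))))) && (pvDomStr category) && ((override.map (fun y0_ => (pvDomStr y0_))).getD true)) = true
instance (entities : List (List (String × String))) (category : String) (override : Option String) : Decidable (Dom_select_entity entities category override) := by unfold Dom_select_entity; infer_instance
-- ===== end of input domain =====

-- B replaces A's build-scored-pairs / stable-reverse-sort / take-first selection by a one-pass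
-- max with a scoring key, and the override loop by a first-match search that skips entities
-- without an 'entity_id' key (where A raises KeyError). Objective: simpler.

-- ===== PORT A =====
-- score accumulation of A's loop body (score = 0; score += 10/5/3)
def selA_score (e : List (String × String)) : Int :=
  let s0 : Int := 0
  let s1 := if PySem.Dict.get? ⟨e⟩ "state_class" == some "total_increasing"
               || PySem.Dict.get? ⟨e⟩ "state_class" == some "total" then s0 + 10 else s0
  let s2 := if PySem.Dict.get? ⟨e⟩ "unit" == some "kWh"
               || PySem.Dict.get? ⟨e⟩ "unit" == some "Wh" then s1 + 5 else s1
  let s3 := if PySem.Dict.get? ⟨e⟩ "device_class" == some "energy" then s2 + 3 else s2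
  s3

-- A's override loop: e["entity_id"] raises KeyError when the key is missing (→ none, excluded by Pre_)
def selA_loop (ov : String) : List (List (String × String)) → Option (List (String × String))
  | [] => some [("entity_id", ov), ("unit", "kWh"), ("state_class", "total_increasing")]
  | e :: rest =>
    match PySem.Dict.get? ⟨e⟩ "entity_id" with
    | none => none
    | some v => if v == ov then some e else selA_loop ov rest

-- the code after the override block (shared by override=None and falsy override)
def selA_rest (entities : List (List (String × String))) : Option (List (String × String)) :=
  if entities = [] then none
  else
    let scored := entities.map (fun e => (selA_score e, e))
    match PySem.List.sorted scored (fun p => p.1) true with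
    | [] => none
    | p :: _ => some p.2

def select_entity (entities : List (List (String × String))) (category : String) (override : Option String) : Option (List (String × String)) :=
  match override with
  | some ov => if ov ≠ "" then selA_loop ov entities else selA_rest entities
  | none => selA_rest entities

-- ===== PORT B =====
def selB_score (e : List (String × String)) : Int :=
  (if PySem.Dict.get? ⟨e⟩ "state_class" == some "total_increasing"
      || PySem.Dict.get? ⟨e⟩ "state_class" == some "total" then 10 else 0)
  + (if PySem.Dict.get? ⟨e⟩ "unit" == some "kWh"
        || PySem.Dict.get? ⟨e⟩ "unit" == some "Wh" then 5 else 0)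
  + (if PySem.Dict.get? ⟨e⟩ "device_class" == some "energy" then 3 else 0)

def selB_rest (entities : List (List (String × String))) : Option (List (String × String)) :=
  if entities = [] then none
  else PySem.List.max? entities selB_score

def select_entity_alt (entities : List (List (String × String))) (category : String) (override : Option String) : Option (List (String × String)) :=
  match override with
  | some ov =>
    if ov ≠ "" then
      match entities.find? (fun e => PySem.Dict.get? ⟨e⟩ "entity_id" == some ov) with
      | some e => some e
      | none => some [("entity_id", ov), ("unit", "kWh"), ("state_class", "total_increasing")]
    else selB_rest entities
  | none => selB_rest entities

-- ===== PRECONDITION & SPEC =====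
-- Pre_ excludes exactly the inputs where A raises KeyError: a truthy override with some entity
-- lacking the 'entity_id' key among those scanned before the first match.
def Pre_select_entity (entities : List (List (String × String))) (category : String) (override : Option String) : Prop :=
  override.getD "" = "" ∨
    ∀ e ∈ entities.takeWhile
        (fun e => !(PySem.Dict.get? ⟨e⟩ "entity_id" == some (override.getD ""))),
      (PySem.Dict.get? (⟨e⟩ : PySem.Dict String String) "entity_id").isSome = true
instance (entities : List (List (String × String))) (category : String) (override : Option String) : Decidable (Pre_select_entity entities category override) := by unfold Pre_select_entity; infer_instance

def pvWitness_select_entity : (List (List (String × String))) × String × Option String :=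
  ([[("entity_id", "a"), ("unit", "kWh")], [("unit", "Wh")]], "grid", some "a")

def Spec_select_entity (entities : List (List (String × String))) (category : String) (override : Option String) (out : Option (List (String × String))) : Prop := out = select_entity_alt entities category override
instance (entities : List (List (String × String))) (category : String) (override : Option String) (out : Option (List (String × String))) : Decidable (Spec_select_entity entities category override out) := by unfold Spec_select_entity; infer_instance

-- ===== CLAIM (what is proved, stated in full; the proofs are below) =====
def Claim_equal_select_entity : Prop := ∀ (entities : List (List (String × String))) (category : String) (override : Option String), Dom_select_entity entities category override → Pre_select_entity entities category override → Spec_select_entity entities category override (select_entity entities category override)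

-- ===== LEMMAS AND PROOFS =====

-- the two scoring functions agree
lemma score_eq : selA_score = selB_score := by
  funext e
  simp only [selA_score, selB_score]
  split_ifs <;> norm_num

-- first element of the list attaining the maximal key (Python's max / stable reverse-sort head)
def firstMax {α : Type} (k : α → Int) (m : α) : List α → α
  | [] => m
  | x :: xs => firstMax k (if k m < k x then x else m) xs

lemma max?_foldl_eq {α : Type} (k : α → Int) (xs : List α) :
    ∀ m : α, List.foldl
      (fun acc x => match acc with
        | none => some x
        | some m => if k m < k x then some x else some m)
      (some m) xs = some (firstMax k m xs) := by
  induction xs with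
  | nil => intro m; rfl
  | cons x xs ih =>
    intro m
    simp only [List.foldl_cons, firstMax]
    by_cases h : k m < k x <;> simp [h, ih]

lemma max?_eq_firstMax {α : Type} (k : α → Int) (x : α) (xs : List α) :
    PySem.List.max? (x :: xs) k = some (firstMax k x xs) := by
  simp only [PySem.List.max?, List.foldl_cons]
  exact max?_foldl_eq k xs x

lemma insertBy_head {α : Type} (k : α → Int) (x h : α) (t : List α) :
    ∃ t', PySem.List.insertBy (fun a b => decide (k b < k a)) x (h :: t)
        = (if k h < k x then x else h) :: t' := by
  by_cases hc : k h < k x <;> simp [PySem.List.insertBy, hc]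

lemma foldl_insertBy_head {α : Type} (k : α → Int) (xs : List α) :
    ∀ (h : α) (t : List α),
      (List.foldl (fun acc y => PySem.List.insertBy (fun a b => decide (k b < k a)) y acc)
        (h :: t) xs).head? = some (firstMax k h xs) := by
  induction xs with
  | nil => intro h t; rfl
  | cons x xs ih =>
    intro h t
    simp only [List.foldl_cons, firstMax]
    obtain ⟨t', ht'⟩ := insertBy_head k x h t
    rw [ht', ih]

lemma sorted_rev_head {α : Type} (k : α → Int) (x : α) (xs : List α) :
    (PySem.List.sorted (x :: xs) k true).head? = some (firstMax k x xs) := by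
  have hs : PySem.List.sorted (x :: xs) k true
      = List.foldl (fun acc y => PySem.List.insertBy (fun a b => decide (k b < k a)) y acc)
          [x] xs := rfl
  rw [hs]
  exact foldl_insertBy_head k xs x []

lemma firstMax_map_pair {α : Type} (k : α → Int) (xs : List α) :
    ∀ e : α, firstMax (fun p => p.1) (k e, e) (xs.map (fun x => (k x, x)))
      = (k (firstMax k e xs), firstMax k e xs) := by
  induction xs with
  | nil => intro e; rfl
  | cons x xs ih =>
    intro e
    simp only [List.map_cons, firstMax]
    by_cases h : k e < k x <;> simp [h, ih]

lemma rest_eq (entities : List (List (String × String))) :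
    selA_rest entities = selB_rest entities := by
  cases entities with
  | nil => rfl
  | cons y ys =>
    simp only [selA_rest, selB_rest, if_neg (List.cons_ne_nil y ys)]
    rw [max?_eq_firstMax]
    have h := sorted_rev_head (fun p : Int × List (String × String) => p.1)
      (selA_score y, y) (ys.map (fun e => (selA_score e, e)))
    rw [firstMax_map_pair] at h
    have hmap : (y :: ys).map (fun e => (selA_score e, e))
        = (selA_score y, y) :: ys.map (fun e => (selA_score e, e)) := rfl
    rw [hmap]
    cases hs : PySem.List.sorted ((selA_score y, y) :: ys.map (fun e => (selA_score e, e)))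
        (fun p => p.1) true with
    | nil => rw [hs] at h; simp at h
    | cons p t =>
      rw [hs] at h
      simp only [List.head?_cons, Option.some.injEq] at h
      rw [h, score_eq]

lemma loop_eq (ov : String) (entities : List (List (String × String))) :
    (∀ e ∈ entities.takeWhile (fun e => !(PySem.Dict.get? ⟨e⟩ "entity_id" == some ov)),
      (PySem.Dict.get? (⟨e⟩ : PySem.Dict String String) "entity_id").isSome = true) →
    selA_loop ov entities
      = match entities.find? (fun e => PySem.Dict.get? ⟨e⟩ "entity_id" == some ov) with
        | some e => some e
        | none => some [("entity_id", ov), ("unit", "kWh"), ("state_class", "total_increasing")] := by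
  induction entities with
  | nil => intro _; rfl
  | cons e rest ih =>
    intro hpre
    cases hg : PySem.Dict.get? (⟨e⟩ : PySem.Dict String String) "entity_id" with
    | none =>
      exfalso
      have he : e ∈ (e :: rest).takeWhile
          (fun e => !(PySem.Dict.get? ⟨e⟩ "entity_id" == some ov)) := by
        simp [List.takeWhile, hg]
      have := hpre e he
      rw [hg] at this
      simp at this
    | some v =>
      by_cases hv : (v == ov) = true
      · rw [List.find?_cons_of_pos (by rw [hg]; simpa using hv)]
        simp only [selA_loop, hg, hv, if_pos]
      · rw [List.find?_cons_of_neg (by rw [hg]; simpa using hv)]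
        simp only [selA_loop, hg, hv, if_neg, Bool.false_eq_true, not_false_iff]
        apply ih
        intro e' he'
        apply hpre
        have htw : (e :: rest).takeWhile (fun e => !(PySem.Dict.get? ⟨e⟩ "entity_id" == some ov))
            = e :: rest.takeWhile (fun e => !(PySem.Dict.get? ⟨e⟩ "entity_id" == some ov)) := by
          rw [List.takeWhile_cons_of_pos (by rw [hg]; simpa using hv)]
        rw [htw]
        exact List.mem_cons_of_mem e he'

-- ===== VERDICT (by name: the statement is the Claim_ definition above) =====
theorem select_entity_spec : Claim_equal_select_entity := by
  intro entities category override _ hpre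
  unfold Spec_select_entity
  cases override with
  | none => simpa [select_entity, select_entity_alt] using rest_eq entities
  | some ov =>
    by_cases hov : ov = ""
    · simpa [select_entity, select_entity_alt, hov] using rest_eq entities
    · simp only [select_entity, select_entity_alt, if_neg, hov, ne_eq, not_false_iff, if_pos]
      rcases hpre with h | h
      · simp [Option.getD] at h; exact absurd h hov
      · simp only [Option.getD] at h
        exact loop_eq ov entities h
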